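-- pv_equiv track=rewrite | github.com/hu-yihao/cv2-homework | math.py | find_waves
-- ===== SOURCE A (Python) =====
-- def find_waves(threshold, histogram):
--     up_point = -1  # 上升点
--     is_peak = False
--     if histogram[0] > threshold:
--         up_point = 0
--         is_peak = True
--     wave_peaks = []
--     for i, x in enumerate(histogram):
--         if is_peak and x < threshold:
--             if i - up_point > 2:
--                 is_peak = False
--                 wave_peaks.append((up_point, i))
--         elif not is_peak and x >= threshold:
--             is_peak = True
--             up_point = i
--     if is_peak and up_point != -1 and i - up_point > 4:
--         wave_peaks.append((up_point, i))
--     return wave_peaks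
-- ===== SOURCE B (Python) =====
-- def find_waves(threshold, histogram):
--     # Two-level index scan: find a start, jump 3 ahead and scan for the first
--     # below-threshold index that closes the peak (gaps closer than 3 to the
--     # start are absorbed, as in the original state machine).
--     waves = []
--     n = len(histogram)
--     i = 0
--     while i < n:
--         if histogram[i] >= threshold:
--             up = i
--             j = up + 3
--             while j < n and histogram[j] >= threshold:
--                 j += 1
--             if j < n:
--                 waves.append((up, j))
--                 i = j + 1
--             else:
--                 if n - 1 - up > 4:
--                     waves.append((up, n - 1))
--                 i = n
--         else:
--             i += 1
--     return waves
-- ===== Notes on version B (the rewrite author's own statement) =====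
-- stated objective: simpler
-- what changed: Replaced the boolean state machine folded over enumerate (is_peak/up_point flags with a trailing end-of-array fixup) by a direct two-level index scan: an outer loop finds each peak start, an inner scan from start+3 finds the first below-threshold index that closes it, and the index jumps past the closed peak.
import Mathlib
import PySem

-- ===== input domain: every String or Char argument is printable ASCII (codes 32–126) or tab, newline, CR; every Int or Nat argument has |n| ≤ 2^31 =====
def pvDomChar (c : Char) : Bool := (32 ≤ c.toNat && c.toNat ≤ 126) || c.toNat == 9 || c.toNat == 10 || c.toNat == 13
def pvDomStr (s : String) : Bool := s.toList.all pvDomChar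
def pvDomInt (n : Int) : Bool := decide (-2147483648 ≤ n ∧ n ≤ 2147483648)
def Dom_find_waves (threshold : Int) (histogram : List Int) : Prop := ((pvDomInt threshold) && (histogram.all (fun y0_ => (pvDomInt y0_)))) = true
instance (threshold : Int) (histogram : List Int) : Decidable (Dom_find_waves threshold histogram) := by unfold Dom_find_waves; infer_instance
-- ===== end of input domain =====

-- B replaces A's boolean state machine over enumerate by a two-level index scan
-- (outer loop finds a peak start, inner scan from start+3 finds the closing drop);
-- objective: simpler decomposition, same O(n) cost.

-- ===== PORT A =====
-- one step of the 'for i, x in enumerate(histogram)' loop; state = (up_point, is_peak, wave_peaks)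
def fwStep (threshold : Int) (st : Int × Bool × List (Int × Int)) (p : Int × Int) : Int × Bool × List (Int × Int) :=
  match st, p with
  | (up, pk, acc), (i, x) =>
    if pk && decide (x < threshold) then
      if i - up > 2 then (up, false, acc ++ [(up, i)]) else (up, pk, acc)
    else if (!pk) && decide (threshold ≤ x) then (i, true, acc)
    else (up, pk, acc)

def find_waves (threshold : Int) (histogram : List Int) : List (Int × Int) :=
  match PySem.List.pyGet? histogram 0 with
  | none => []   -- Python raises IndexError on histogram[0]; excluded by Pre_
  | some h0 =>
    let st0 : Int × Bool := if h0 > threshold then (0, true) else (-1, false)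
    match List.foldl (fwStep threshold) (st0.1, st0.2, []) (PySem.List.enumerate histogram 0) with
    | (up, pk, acc) =>
      -- after the loop the Python variable i holds len(histogram) - 1
      let i : Int := (histogram.length : Int) - 1
      if pk && decide (up ≠ -1) && decide (i - up > 4) then acc ++ [(up, i)] else acc

-- ===== PORT B =====
-- inner 'while j < n and histogram[j] >= threshold: j += 1'
def fwInner (threshold : Int) (h : List Int) (j : Nat) : Nat :=
  if hj : j < h.length then
    if threshold ≤ h[j] then fwInner threshold h (j + 1) else j
  else j
termination_by h.length - j

theorem fwInner_ge (threshold : Int) (h : List Int) (j : Nat) : j ≤ fwInner threshold h j := by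
  fun_induction fwInner threshold h j with
  | case1 j hj hx ih => omega
  | case2 j hj hx => omega
  | case3 j hj => omega

-- outer 'while i < n' loop of B
def fwOuter (threshold : Int) (h : List Int) (i : Nat) : List (Int × Int) :=
  if hi : i < h.length then
    if threshold ≤ h[i] then
      let j := fwInner threshold h (i + 3)
      if j < h.length then ((i : Int), (j : Int)) :: fwOuter threshold h (j + 1)
      else if (h.length : Int) - 1 - (i : Int) > 4 then [((i : Int), (h.length : Int) - 1)] else []
    else fwOuter threshold h (i + 1)
  else []
termination_by h.length - i
decreasing_by
  · have := fwInner_ge threshold h (i + 3); omega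
  · omega

def find_waves_alt (threshold : Int) (histogram : List Int) : List (Int × Int) :=
  fwOuter threshold histogram 0

-- ===== PRECONDITION & SPEC =====
-- A reads histogram[0] before anything else, so it raises IndexError on an empty list.
def Pre_find_waves (threshold : Int) (histogram : List Int) : Prop := histogram ≠ []
instance (threshold : Int) (histogram : List Int) : Decidable (Pre_find_waves threshold histogram) := by unfold Pre_find_waves; infer_instance
def pvWitness_find_waves : Int × List Int := (2, [3, 3, 3, 0, 1, 5, 5, 5, 5, 0])

def Spec_find_waves (threshold : Int) (histogram : List Int) (out : List (Int × Int)) : Prop := out = find_waves_alt threshold histogram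
instance (threshold : Int) (histogram : List Int) (out : List (Int × Int)) : Decidable (Spec_find_waves threshold histogram out) := by unfold Spec_find_waves; infer_instance

-- ===== CLAIM (what is proved, stated in full; the proofs are below) =====
def Claim_equal_find_waves : Prop := ∀ (threshold : Int) (histogram : List Int), Dom_find_waves threshold histogram → Pre_find_waves threshold histogram → Spec_find_waves threshold histogram (find_waves threshold histogram)

-- ===== LEMMAS AND PROOFS =====

-- A's remaining computation, started at position i with state (up, pk, acc):
-- fold the step function over the enumeration of the tail, then apply the final fixup.
def fwRun (threshold : Int) (h : List Int) (i : Nat) (up : Int) (pk : Bool) (acc : List (Int × Int)) : List (Int × Int) :=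
  match List.foldl (fwStep threshold) (up, pk, acc) (PySem.List.enumerate (h.drop i) (i : Int)) with
  | (up', pk', acc') =>
    if pk' && decide (up' ≠ -1) && decide ((h.length : Int) - 1 - up' > 4) then acc' ++ [(up', (h.length : Int) - 1)] else acc'

theorem fwRun_past (threshold : Int) (h : List Int) (i : Nat) (hi : h.length ≤ i)
    (up : Int) (pk : Bool) (acc : List (Int × Int)) :
    fwRun threshold h i up pk acc =
      if pk && decide (up ≠ -1) && decide ((h.length : Int) - 1 - up > 4) then acc ++ [(up, (h.length : Int) - 1)] else acc := by
  unfold fwRun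
  rw [List.drop_eq_nil_of_le hi]
  simp [PySem.List.enumerate]

theorem fwRun_step (threshold : Int) (h : List Int) (i : Nat) (hi : i < h.length)
    (up : Int) (pk : Bool) (acc : List (Int × Int)) :
    fwRun threshold h i up pk acc =
      match fwStep threshold (up, pk, acc) ((i : Int), h[i]) with
      | (up', pk', acc') => fwRun threshold h (i + 1) up' pk' acc' := by
  unfold fwRun
  have hdrop : h.drop i = h[i] :: h.drop (i + 1) := List.drop_eq_getElem_cons hi
  rw [hdrop, PySem.List.enumerate_cons]
  rcases hst : fwStep threshold (up, pk, acc) ((i : Int), h[i]) with ⟨up', pk', acc'⟩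
  simp only [List.foldl_cons, hst]
  norm_num

-- while open within 3 of the start, every element is ignored by A's state machine
theorem fwRun_skip (threshold : Int) (h : List Int) (up : Nat) :
    ∀ k (j : Nat), up ≤ j → j + k = up + 3 → ∀ acc,
      fwRun threshold h j (up : Int) true acc = fwRun threshold h (up + 3) (up : Int) true acc := by
  intro k
  induction k with
  | zero => intro j _ hj acc; have : j = up + 3 := by omega
            subst this; rfl
  | succ k ih =>
    intro j hj hjk acc
    by_cases hjn : j < h.length
    · rw [fwRun_step threshold h j hjn]
      have hstep : fwStep threshold ((up : Int), true, acc) ((j : Int), h[j]) = ((up : Int), true, acc) := by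
        unfold fwStep
        by_cases hx : h[j] < threshold
        · have h2 : ¬ ((j : Int) - (up : Int) > 2) := by omega
          simp [hx, h2]
        · simp [hx]
      rw [hstep]
      exact ih (j + 1) (by omega) (by omega) acc
    · rw [fwRun_past threshold h j (by omega), fwRun_past threshold h (up + 3) (by omega)]

-- the closing phase: state (up, true) at position j ≥ up+3 produces exactly B's
-- "(up, first drop) :: rest" (or the end-of-array interval)
def fwClose (threshold : Int) (h : List Int) (up j : Nat) : List (Int × Int) :=
  let j' := fwInner threshold h j
  if j' < h.length then ((up : Int), (j' : Int)) :: fwOuter threshold h (j' + 1)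
  else if (h.length : Int) - 1 - (up : Int) > 4 then [((up : Int), (h.length : Int) - 1)] else []

theorem fwMain_past (threshold : Int) (h : List Int) (i : Nat) (hin : h.length ≤ i) (acc : List (Int × Int)) :
    (∀ up : Int, fwRun threshold h i up false acc = acc ++ fwOuter threshold h i) ∧
    (∀ up : Nat, up + 3 ≤ i → fwRun threshold h i (up : Int) true acc = acc ++ fwClose threshold h up i) := by
  have hups : ¬ (i < h.length) := by omega
  constructor
  · intro up
    rw [fwRun_past threshold h i hin]
    rw [fwOuter]
    simp [hups]
  · intro up hup
    rw [fwRun_past threshold h i hin]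
    unfold fwClose
    have hinner : fwInner threshold h i = i := by
      rw [fwInner]; simp [hups]
    have hne : ((up : Int) ≠ -1) := by omega
    rw [hinner]
    simp only [hups]
    by_cases hc : (h.length : Int) - 1 - (up : Int) > 4
    · simp [hne, hc]
    · simp [hne, hc]

theorem fwMainAux (threshold : Int) (h : List Int) :
    ∀ (k i : Nat), h.length ≤ i + k → ∀ (acc : List (Int × Int)),
      (∀ up : Int, fwRun threshold h i up false acc = acc ++ fwOuter threshold h i) ∧
      (∀ up : Nat, up + 3 ≤ i → fwRun threshold h i (up : Int) true acc = acc ++ fwClose threshold h up i) := by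
  intro k
  induction k with
  | zero => intro i hk acc; exact fwMain_past threshold h i (by omega) acc
  | succ k ih =>
    intro i hk acc
    by_cases hin : i < h.length
    · constructor
      · intro up
        rw [fwRun_step threshold h i hin]
        by_cases hx : threshold ≤ h[i]
        · have hstep : fwStep threshold (up, false, acc) ((i : Int), h[i]) = ((i : Int), true, acc) := by
            unfold fwStep; simp [hx, not_lt.mpr hx]
          rw [hstep]
          show fwRun threshold h (i + 1) _ _ _ = _
          have hskip := fwRun_skip threshold h i 2 (i + 1) (by omega) (by omega) acc
          rw [hskip]
          have hclose := (ih (i + 3) (by omega) acc).2 i (by omega)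
          rw [hclose]
          rw [fwOuter]
          simp only [hin, dif_pos, if_pos hx]
          rfl
        · have hstep : fwStep threshold (up, false, acc) ((i : Int), h[i]) = (up, false, acc) := by
            unfold fwStep; simp [hx]
          rw [hstep]
          show fwRun threshold h (i + 1) _ _ _ = _
          rw [fwOuter]
          simp only [hin, dif_pos, if_neg hx]
          exact (ih (i + 1) (by omega) acc).1 up
      · intro up hup
        rw [fwRun_step threshold h i hin]
        by_cases hx : threshold ≤ h[i]
        · have hstep : fwStep threshold ((up : Int), true, acc) ((i : Int), h[i]) = ((up : Int), true, acc) := by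
            unfold fwStep; simp [not_lt.mpr hx]
          rw [hstep]
          show fwRun threshold h (i + 1) _ _ _ = _
          rw [(ih (i + 1) (by omega) acc).2 up (by omega)]
          unfold fwClose
          have : fwInner threshold h i = fwInner threshold h (i + 1) := by
            rw [fwInner]; simp [hin, hx]
          rw [this]
        · have hx2 : h[i] < threshold := lt_of_not_ge hx
          have hstep : fwStep threshold ((up : Int), true, acc) ((i : Int), h[i]) =
              ((up : Int), false, acc ++ [((up : Int), (i : Int))]) := by
            unfold fwStep
            have h2 : (i : Int) - (up : Int) > 2 := by omega
            simp [hx2, h2]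
          rw [hstep]
          show fwRun threshold h (i + 1) _ _ _ = _
          rw [(ih (i + 1) (by omega) (acc ++ [((up : Int), (i : Int))])).1 (up : Int)]
          unfold fwClose
          have hinner : fwInner threshold h i = i := by
            rw [fwInner]; simp [hin, hx]
          rw [hinner]
          simp [hin]
    · exact fwMain_past threshold h i (by omega) acc

theorem fwMain (threshold : Int) (h : List Int) (i : Nat) (acc : List (Int × Int)) :
    (∀ up : Int, fwRun threshold h i up false acc = acc ++ fwOuter threshold h i) ∧
    (∀ up : Nat, up + 3 ≤ i → fwRun threshold h i (up : Int) true acc = acc ++ fwClose threshold h up i) :=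
  fwMainAux threshold h h.length i (by omega) acc

theorem find_waves_eq (threshold : Int) (histogram : List Int) (hne : histogram ≠ []) :
    find_waves threshold histogram = find_waves_alt threshold histogram := by
  obtain ⟨h0, t, rfl⟩ : ∃ h0 t, histogram = h0 :: t := by
    cases histogram with
    | nil => exact absurd rfl hne
    | cons a b => exact ⟨a, b, rfl⟩
  have hget : PySem.List.pyGet? (h0 :: t) 0 = some h0 := PySem.List.pyGet?_zero_cons h0 t
  by_cases hgt : h0 > threshold
  · have e1 : find_waves threshold (h0 :: t) = fwRun threshold (h0 :: t) 0 0 true [] := by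
      unfold find_waves fwRun
      rw [hget]
      simp [hgt]
    rw [e1]
    have hskip := fwRun_skip threshold (h0 :: t) 0 3 0 (by omega) (by omega) ([] : List (Int × Int))
    have hclose := (fwMain threshold (h0 :: t) 3 ([] : List (Int × Int))).2 0 (by omega)
    rw [show ((0 : Nat) : Int) = (0 : Int) from rfl] at hskip hclose
    rw [show (0 : Nat) + 3 = 3 from rfl] at hskip
    rw [hskip, hclose]
    unfold find_waves_alt
    rw [fwOuter]
    have h0len : 0 < (h0 :: t).length := by simp
    have hx0 : threshold ≤ (h0 :: t)[0] := by simpa using le_of_lt hgt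
    simp only [h0len, dif_pos, if_pos hx0]
    rfl
  · have e1 : find_waves threshold (h0 :: t) = fwRun threshold (h0 :: t) 0 (-1) false [] := by
      unfold find_waves fwRun
      rw [hget]
      simp [hgt]
    rw [e1]
    have := (fwMain threshold (h0 :: t) 0 ([] : List (Int × Int))).1 (-1)
    rw [this]
    simp [find_waves_alt]

-- ===== VERDICT (by name: the statement is the Claim_ definition above) =====
theorem find_waves_spec : Claim_equal_find_waves := by
  intro threshold histogram _ hpre
  unfold Spec_find_waves
  exact find_waves_eq threshold histogram hpre
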